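-- pv_equiv track=rewrite | github.com/rotweinur/Practise_15 | task_13.py | odd_list
-- ===== SOURCE A (Python) =====
-- def odd_list(a: list, n: int) -> list:
--     """Return a list of even integers from the first n elements of a list.
--
--     :param a: list of integers
--     :param n: number of elements to consider from the list
--     :return: list of even integers
--     :raises TypeError: if a is not a list or contains non-integers, or n is not an int
--     :raises ValueError: if n < 0 or n > len(a)
--     """
--     if not isinstance(a, list):
--         raise TypeError("a must be a list")
--     if not isinstance(n, int):
--         raise TypeError("n must be an integer")
--     if n < 0 or n > len(a):
--         raise ValueError("n must be in range 0..len(a)")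
--
--     for i in range(n):
--         if not isinstance(a[i], int):
--             raise TypeError("all elements must be integers")
--
--     if n == 0:
--         return []
--
--     rest = odd_list(a, n - 1)
--     if a[n - 1] % 2 == 0:
--         rest.append(a[n - 1])
--
--     return rest
-- ===== SOURCE B (Python) =====
-- def odd_list(a: list, n: int) -> list:
--     """Return a list of even integers from the first n elements of a list."""
--     if not isinstance(a, list):
--         raise TypeError("a must be a list")
--     if not isinstance(n, int):
--         raise TypeError("n must be an integer")
--     if n < 0 or n > len(a):
--         raise ValueError("n must be in range 0..len(a)")
--     for x in a[:n]:
--         if not isinstance(x, int):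
--             raise TypeError("all elements must be integers")
--     return [x for x in a[:n] if x % 2 == 0]
-- ===== Notes on version B (the rewrite author's own statement) =====
-- stated objective: simpler
-- what changed: Replaces A's bottom-up recursion (which re-runs the element-validation loop at every recursion level) by one validation pass over a[:n] and one forward comprehension collecting the evens.
import Mathlib
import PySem

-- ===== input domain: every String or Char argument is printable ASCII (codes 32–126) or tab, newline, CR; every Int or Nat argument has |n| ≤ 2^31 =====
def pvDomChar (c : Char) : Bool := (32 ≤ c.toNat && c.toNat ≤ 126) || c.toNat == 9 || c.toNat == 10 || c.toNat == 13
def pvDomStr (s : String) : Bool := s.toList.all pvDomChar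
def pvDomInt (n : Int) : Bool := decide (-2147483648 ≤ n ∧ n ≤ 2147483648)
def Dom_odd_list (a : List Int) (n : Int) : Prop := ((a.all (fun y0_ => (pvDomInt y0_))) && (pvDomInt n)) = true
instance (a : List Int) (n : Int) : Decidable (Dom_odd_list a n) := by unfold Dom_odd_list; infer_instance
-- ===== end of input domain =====

-- B replaces A's bottom-up recursion (append-per-level) by one forward filter over the prefix; return value only.
-- ===== PORT A =====
-- A recurses on n, appending a[n-1] if even; the `n ≤ 0` guard only makes the recursion total
-- (A raises ValueError for n < 0, which Pre_ excludes).
def odd_list (a : List Int) (n : Int) : List Int :=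
  if _h : n ≤ 0 then []
  else
    let rest := odd_list a (n - 1)
    match PySem.List.pyGet? a (n - 1) with
    | some x => if PySem.Int.mod x 2 = 0 then rest ++ [x] else rest
    | none => rest
termination_by n.toNat
decreasing_by omega

-- ===== PORT B =====
def odd_list_alt (a : List Int) (n : Int) : List Int :=
  (PySem.List.slice a none (some n)).filter (fun x => PySem.Int.mod x 2 = 0)

-- ===== PRECONDITION & SPEC =====
-- Pre_ excludes exactly the inputs on which A raises ValueError (n < 0 or n > len(a)).
def Pre_odd_list (a : List Int) (n : Int) : Prop := 0 ≤ n ∧ n ≤ a.length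
instance (a : List Int) (n : Int) : Decidable (Pre_odd_list a n) := by unfold Pre_odd_list; infer_instance
def pvWitness_odd_list : List Int × Int := ([1, 2, 3, 4], 3)

def Spec_odd_list (a : List Int) (n : Int) (out : List Int) : Prop := out = odd_list_alt a n
instance (a : List Int) (n : Int) (out : List Int) : Decidable (Spec_odd_list a n out) := by unfold Spec_odd_list; infer_instance

-- ===== CLAIM (what is proved, stated in full; the proofs are below) =====
def Claim_equal_odd_list : Prop := ∀ (a : List Int) (n : Int), Dom_odd_list a n → Pre_odd_list a n → Spec_odd_list a n (odd_list a n)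

-- ===== LEMMAS AND PROOFS =====
theorem odd_list_natCast (a : List Int) (m : Nat) (hm : m ≤ a.length) :
    odd_list a (m : Int) = (a.take m).filter (fun x => decide (PySem.Int.mod x 2 = 0)) := by
  induction m with
  | zero => simp [odd_list]
  | succ k ih =>
    rw [odd_list]
    have hk : ¬ ((k + 1 : Nat) : Int) ≤ 0 := by omega
    have hlt : k < a.length := by omega
    have hget : PySem.List.pyGet? a ((k : Nat) : Int) = some a[k] := by
      rw [PySem.List.pyGet?_natCast]
      simp [hlt]
    have hrec : (((k + 1 : Nat) : Int) - 1) = ((k : Nat) : Int) := by omega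
    rw [dif_neg hk, hrec, hget, ih (by omega)]
    rw [List.take_add_one, List.filter_append]
    simp [List.getElem?_eq_getElem hlt]
    split <;> simp_all

-- ===== VERDICT (by name: the statement is the Claim_ definition above) =====
theorem odd_list_spec : Claim_equal_odd_list := by
  intro a n _ hpre
  obtain ⟨h0, hle⟩ := hpre
  unfold Spec_odd_list odd_list_alt
  obtain ⟨m, rfl⟩ := Int.eq_ofNat_of_zero_le h0
  rw [PySem.List.slice_to_natCast, odd_list_natCast a m (by exact_mod_cast hle)]
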